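-- pv_equiv track=rewrite | github.com/david-santander/sso | app1-saml/backend/app.py | check_role_hierarchy
-- ===== SOURCE A (Python) =====
-- def check_role_hierarchy(user_roles, required_role):
--     """
--     Check if user has required role considering role hierarchy.
--
--     Implements hierarchical RBAC where higher roles inherit permissions
--     of lower roles (admin > editor > viewer).
--
--     Args:
--         user_roles: List of roles assigned to the user
--         required_role: The role required to access the resource
--
--     Returns:
--         bool: True if user has required role or a higher role
--     """
--     # Define role hierarchy - higher roles inherit permissions of lower roles
--     role_hierarchy = {
--         'admin': ['editor', 'viewer'],  # Admin can do everything editor and viewer can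
--         'editor': ['viewer'],            # Editor can do everything viewer can
--         'viewer': []                     # Viewer has no inherited permissions
--     }
--
--     # Direct role check
--     if required_role in user_roles:
--         return True
--
--     # Check hierarchical roles
--     for user_role in user_roles:
--         if user_role in role_hierarchy and required_role in role_hierarchy[user_role]:
--             return True
--
--     return False
-- ===== SOURCE B (Python) =====
-- def check_role_hierarchy(user_roles, required_role):
--     """Rank-based version: the hierarchy is a total order, so map roles to
--     numeric levels, take the user's maximum level and compare it with the
--     required level; unknown required roles need an exact match."""
--     ROLE_LEVEL = {'viewer': 1, 'editor': 2, 'admin': 3}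
--     need = ROLE_LEVEL.get(required_role)
--     if need is None:
--         return required_role in user_roles
--     best = 0
--     for role in user_roles:
--         best = max(best, ROLE_LEVEL.get(role, 0))
--     return best >= need
-- ===== Notes on version B (the rewrite author's own statement) =====
-- stated objective: alternative
-- what changed: A scans each user role's inherited list for the required role; B exploits that the hierarchy is a total order and compares numeric ranks: it maps roles to levels, folds the maximum level over the user's roles and tests it against the required level (exact membership only for unknown required roles).
import Mathlib
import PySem

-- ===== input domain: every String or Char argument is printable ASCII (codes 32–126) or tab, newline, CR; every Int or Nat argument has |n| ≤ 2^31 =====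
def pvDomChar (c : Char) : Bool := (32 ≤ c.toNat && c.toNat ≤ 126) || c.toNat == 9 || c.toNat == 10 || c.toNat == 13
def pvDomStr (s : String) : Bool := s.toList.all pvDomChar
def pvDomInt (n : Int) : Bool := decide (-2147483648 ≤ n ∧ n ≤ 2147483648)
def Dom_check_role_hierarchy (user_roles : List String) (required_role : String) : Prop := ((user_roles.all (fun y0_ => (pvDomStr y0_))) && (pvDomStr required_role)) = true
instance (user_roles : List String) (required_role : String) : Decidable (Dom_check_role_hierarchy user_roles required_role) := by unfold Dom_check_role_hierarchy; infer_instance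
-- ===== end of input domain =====

-- B replaces A's scan of inherited lists by numeric rank comparison (the hierarchy is a
-- total order): fold the user's maximum level and compare with the required level (alternative).


-- ===== PORT A =====
-- the role_hierarchy dict literal (insertion order)
def chrHierarchy : PySem.Dict String (List String) :=
  ⟨[("admin", ["editor", "viewer"]), ("editor", ["viewer"]), ("viewer", [])]⟩

-- A's 'for user_role in user_roles' loop with early return
def chrLoop (user_roles : List String) (required_role : String) : Bool :=
  match user_roles with
  | [] => false
  | u :: rest =>
    match PySem.Dict.get? chrHierarchy u with
    | some inh => if inh.contains required_role then true else chrLoop rest required_role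
    | none => chrLoop rest required_role

def check_role_hierarchy (user_roles : List String) (required_role : String) : Bool :=
  if user_roles.contains required_role then true
  else chrLoop user_roles required_role

-- ===== PORT B =====
-- ROLE_LEVEL = {'viewer': 1, 'editor': 2, 'admin': 3}
def chrLevel : PySem.Dict String Int := ⟨[("viewer", 1), ("editor", 2), ("admin", 3)]⟩

def check_role_hierarchy_alt (user_roles : List String) (required_role : String) : Bool :=
  match PySem.Dict.get? chrLevel required_role with
  | none => user_roles.contains required_role
  | some need =>
    let best := user_roles.foldl (fun best role => max best (PySem.Dict.getD chrLevel role 0)) 0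
    decide (need ≤ best)

-- ===== PRECONDITION & SPEC =====
def Spec_check_role_hierarchy (user_roles : List String) (required_role : String) (out : Bool) : Prop := out = check_role_hierarchy_alt user_roles required_role
instance (user_roles : List String) (required_role : String) (out : Bool) : Decidable (Spec_check_role_hierarchy user_roles required_role out) := by unfold Spec_check_role_hierarchy; infer_instance

-- ===== CLAIM (what is proved, stated in full; the proofs are below) =====
def Claim_equal_check_role_hierarchy : Prop := ∀ (user_roles : List String) (required_role : String), Dom_check_role_hierarchy user_roles required_role → Spec_check_role_hierarchy user_roles required_role (check_role_hierarchy user_roles required_role)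

-- ===== LEMMAS AND PROOFS =====

-- the per-element test A's loop performs
def chrElem (u required_role : String) : Bool :=
  match PySem.Dict.get? chrHierarchy u with
  | some inh => inh.contains required_role
  | none => false

theorem chrLoop_eq_any (urs : List String) (req : String) :
    chrLoop urs req = urs.any (fun u => chrElem u req) := by
  induction urs with
  | nil => rfl
  | cons u rest ih =>
    show (match PySem.Dict.get? chrHierarchy u with
          | some inh => if inh.contains req then true else chrLoop rest req
          | none => chrLoop rest req) = _
    rw [List.any_cons, ← ih]
    unfold chrElem
    cases h : PySem.Dict.get? chrHierarchy u with
    | none => simp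
    | some inh => by_cases hc : inh.contains req = true <;> simp_all

-- A as a single any-test
theorem check_eq_any (urs : List String) (req : String) :
    check_role_hierarchy urs req = urs.any (fun u => (u == req) || chrElem u req) := by
  unfold check_role_hierarchy
  rw [show (if urs.contains req then true else chrLoop urs req)
        = (urs.contains req || chrLoop urs req) by by_cases h : urs.contains req <;> simp,
      chrLoop_eq_any,
      show urs.contains req = urs.any (fun u => u == req) from (List.any_beq' ..).symm]
  induction urs with
  | nil => rfl
  | cons u rest ih =>
    simp only [List.any_cons]
    cases h1 : (u == req) <;> cases h2 : chrElem u req <;>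
      cases h3 : rest.any (fun u => u == req) <;> cases h4 : rest.any (fun u => chrElem u req) <;>
      simp_all

-- fold-max against a positive bound equals an any-test
theorem foldl_max_ge (f : String → Int) (n : Int) (hn : 0 < n) (l : List String) :
    decide (n ≤ l.foldl (fun best r => max best (f r)) 0) = l.any (fun r => decide (n ≤ f r)) := by
  have key : ∀ (l : List String) (a : Int),
      decide (n ≤ l.foldl (fun best r => max best (f r)) a)
        = (decide (n ≤ a) || l.any (fun r => decide (n ≤ f r))) := by
    intro l
    induction l with
    | nil => intro a; simp
    | cons u rest ih =>
      intro a
      rw [List.foldl_cons, List.any_cons, ih (max a (f u)),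
          show decide (n ≤ max a (f u)) = (decide (n ≤ a) || decide (n ≤ f u)) by
            by_cases h1 : n ≤ a <;> by_cases h2 : n ≤ f u <;> simp_all,
          Bool.or_assoc]
  rw [key l 0]
  simp [show ¬ n ≤ 0 by omega]

-- unknown roles: no hierarchy entry, level 0
theorem chrElem_unknown (u req : String) (h1 : u ≠ "admin") (h2 : u ≠ "editor") (h3 : u ≠ "viewer") :
    chrElem u req = false := by
  simp [chrElem, chrHierarchy, PySem.Dict.get?, List.find?, beq_eq_decide, Ne.symm h1, Ne.symm h2, Ne.symm h3]

theorem getD_unknown (u : String) (h1 : u ≠ "admin") (h2 : u ≠ "editor") (h3 : u ≠ "viewer") :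
    PySem.Dict.getD chrLevel u 0 = 0 := by
  simp [chrLevel, PySem.Dict.getD, PySem.Dict.get?, List.find?, beq_eq_decide, Ne.symm h1, Ne.symm h2, Ne.symm h3]

theorem level_cases (req : String) (need : Int) (h : PySem.Dict.get? chrLevel req = some need) :
    req = "viewer" ∧ need = 1 ∨ req = "editor" ∧ need = 2 ∨ req = "admin" ∧ need = 3 := by
  by_cases h1 : req = "viewer"
  · subst h1; simp [chrLevel, PySem.Dict.get?] at h; exact Or.inl ⟨rfl, by omega⟩
  · by_cases h2 : req = "editor"
    · subst h2; simp [chrLevel, PySem.Dict.get?, List.find?] at h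
      exact Or.inr (Or.inl ⟨rfl, by omega⟩)
    · by_cases h3 : req = "admin"
      · subst h3; simp [chrLevel, PySem.Dict.get?, List.find?] at h
        exact Or.inr (Or.inr ⟨rfl, by omega⟩)
      · simp [chrLevel, PySem.Dict.get?, List.find?, beq_eq_decide,
              Ne.symm h1, Ne.symm h2, Ne.symm h3] at h

-- per-element: direct-or-inherits equals the level comparison
theorem elem_level (u req : String) (need : Int)
    (h : req = "viewer" ∧ need = 1 ∨ req = "editor" ∧ need = 2 ∨ req = "admin" ∧ need = 3) :
    ((u == req) || chrElem u req) = decide (need ≤ PySem.Dict.getD chrLevel u 0) := by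
  by_cases ua : u = "admin" <;> by_cases ue : u = "editor" <;> by_cases uv : u = "viewer"
  all_goals rcases h with ⟨hr, hn⟩ | ⟨hr, hn⟩ | ⟨hr, hn⟩ <;> subst hr <;> subst hn
  all_goals first
    | (subst_vars; decide)
    | (rw [chrElem_unknown u _ ua ue uv, getD_unknown u ua ue uv]
       simp [beq_eq_decide, ua, ue, uv])

-- unknown required role: A's inheritance test never fires
theorem chrElem_req_unknown (u req : String) (h2 : req ≠ "editor") (h3 : req ≠ "viewer") :
    chrElem u req = false := by
  by_cases ua : u = "admin"
  · subst ua; simp [chrElem, chrHierarchy, PySem.Dict.get?, h2, h3]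
  · by_cases ue : u = "editor"
    · subst ue; simp [chrElem, chrHierarchy, PySem.Dict.get?, List.find?, beq_eq_decide, h3]
    · by_cases uv : u = "viewer"
      · subst uv; simp [chrElem, chrHierarchy, PySem.Dict.get?, List.find?, beq_eq_decide]
      · exact chrElem_unknown u req ua ue uv

theorem req_unknown_of_get?_none (req : String) (h : PySem.Dict.get? chrLevel req = none) :
    req ≠ "editor" ∧ req ≠ "viewer" := by
  constructor <;> intro hr <;> subst hr <;> simp [chrLevel, PySem.Dict.get?, List.find?] at h

-- ===== VERDICT (by name: the statement is the Claim_ definition above) =====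
theorem check_role_hierarchy_spec : Claim_equal_check_role_hierarchy := by
  intro urs req _
  unfold Spec_check_role_hierarchy check_role_hierarchy_alt
  cases hreq : PySem.Dict.get? chrLevel req with
  | none =>
    obtain ⟨h2, h3⟩ := req_unknown_of_get?_none req hreq
    rw [check_eq_any]
    simp only [fun u => chrElem_req_unknown u req h2 h3, Bool.or_false]
    exact (List.any_beq' ..)
  | some need =>
    have hcase := level_cases req need hreq
    dsimp only
    rw [check_eq_any,
        foldl_max_ge _ need (by rcases hcase with ⟨_, h⟩ | ⟨_, h⟩ | ⟨_, h⟩ <;> omega)]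
    congr 1
    funext u
    exact elem_level u req need hcase
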